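-- pv_equiv track=rewrite | github.com/gitAdrianK/AdventOfCode | advent_of_code_2019/day_06/day_06.py | travese_until_common
-- ===== SOURCE A (Python) =====
-- def travese_until_common(orbit, orbits, common, set_=None):
--     if set_ is None:
--         set_ = set()
--     if orbit in common:
--         return set_
--     else:
--         set_.add(orbit)
--         return travese_until_common(orbits[orbit], orbits, common, set_)
-- ===== SOURCE B (Python) =====
-- def travese_until_common(orbit, orbits, common, set_=None):
--     # Iterative with a bounded scan: a chain that never repeats a key makes at
--     # most len(orbits) hops, so len(orbits) + 1 membership tests suffice to
--     # reach a common node; the bound also makes cyclic data terminate.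
--     # Mutates a passed set_ in place, like the original.
--     if set_ is None:
--         set_ = set()
--     node = orbit
--     for _ in range(len(orbits) + 1):
--         if node in common:
--             break
--         set_.add(node)
--         node = orbits[node]
--     return set_
-- ===== Notes on version B (the rewrite author's own statement) =====
-- stated objective: alternative
-- what changed: Replaces A's unbounded recursion (one frame per ancestor) by an iterative scan bounded by len(orbits)+1 steps with explicit (node, set) state, which also terminates on cyclic data where A recurses forever.
import Mathlib
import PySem

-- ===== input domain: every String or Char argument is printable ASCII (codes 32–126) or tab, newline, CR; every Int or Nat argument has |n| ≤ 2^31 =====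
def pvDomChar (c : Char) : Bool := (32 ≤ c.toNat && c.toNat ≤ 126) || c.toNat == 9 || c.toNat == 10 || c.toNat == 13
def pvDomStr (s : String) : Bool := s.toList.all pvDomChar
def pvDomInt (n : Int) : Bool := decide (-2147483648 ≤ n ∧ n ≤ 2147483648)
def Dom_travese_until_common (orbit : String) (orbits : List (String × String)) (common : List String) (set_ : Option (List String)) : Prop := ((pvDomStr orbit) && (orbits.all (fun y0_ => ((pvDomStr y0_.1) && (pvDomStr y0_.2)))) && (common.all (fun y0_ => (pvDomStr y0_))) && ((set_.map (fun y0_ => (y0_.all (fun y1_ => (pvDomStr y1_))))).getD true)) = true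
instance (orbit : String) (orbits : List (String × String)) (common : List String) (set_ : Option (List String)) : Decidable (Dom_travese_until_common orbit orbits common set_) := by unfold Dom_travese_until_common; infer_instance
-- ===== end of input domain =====

-- ===== PORT A =====
-- A's recursion, fuel-bounded: fuel = orbits.length + 1 suffices whenever Python A returns
-- (a non-repeating chain makes at most orbits.length hops). On a missing key (KeyError in
-- Python A, excluded by Pre_) the recursion stops with the set built so far.
def travAux (fuel : Nat) (orbit : String) (orbits : PySem.Dict String String) (common : List String) (set_ : PySem.Set String) : List String :=
  match fuel with
  | 0 => set_
  | fuel + 1 =>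
    if common.contains orbit then set_
    else
      let set' := PySem.Set.add set_ orbit
      match orbits.get? orbit with
      | none => set'                                   -- KeyError in Python A (A does not return here)
      | some nxt => travAux fuel nxt orbits common set'

def travese_until_common (orbit : String) (orbits : List (String × String)) (common : List String) (set_ : Option (List String)) : List String :=
  travAux (orbits.length + 1) orbit (PySem.Dict.mk orbits) common (set_.getD [])

-- ===== PORT B =====
-- B's loop body: state = (current node or none after a missing key, the set so far);
-- 'if … in common: break' is the state-preserving branch of the fold.
def stepFold (orbits : PySem.Dict String String) (common : List String) (st : Option String × PySem.Set String) (_i : Int) : Option String × PySem.Set String :=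
  match st.1 with
  | none => st                                         -- Python B raised KeyError here; unreachable when B returns
  | some node =>
    if common.contains node then st                    -- break: nothing changes any more
    else (orbits.get? node, PySem.Set.add st.2 node)

def travese_until_common_alt (orbit : String) (orbits : List (String × String)) (common : List String) (set_ : Option (List String)) : List String :=
  ((PySem.List.pyRange 0 ((orbits.length : Int) + 1) 1).foldl
      (stepFold (PySem.Dict.mk orbits) common) (some orbit, set_.getD [])).2

-- ===== PRECONDITION & SPEC =====
-- Pre_ excludes exactly the inputs on which Python A does not return: a chain from orbit that
-- never reaches common (infinite recursion on a cycle / RecursionError) or hits a missing key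
-- (KeyError).
def pvStep (orbits : PySem.Dict String String) : Option String → Option String
  | none => none
  | some s => orbits.get? s

def Pre_travese_until_common (orbit : String) (orbits : List (String × String)) (common : List String) (set_ : Option (List String)) : Prop :=
  ∃ k < orbits.length + 1, ∃ s ∈ common, (pvStep (PySem.Dict.mk orbits))^[k] (some orbit) = some s

instance (orbit : String) (orbits : List (String × String)) (common : List String) (set_ : Option (List String)) : Decidable (Pre_travese_until_common orbit orbits common set_) := by unfold Pre_travese_until_common; infer_instance

def pvWitness_travese_until_common : String × (List (String × String)) × List String × Option (List String) :=
  ("A", [("A", "COM")], ["COM"], none)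

def Spec_travese_until_common (orbit : String) (orbits : List (String × String)) (common : List String) (set_ : Option (List String)) (out : List String) : Prop := out = travese_until_common_alt orbit orbits common set_
instance (orbit : String) (orbits : List (String × String)) (common : List String) (set_ : Option (List String)) (out : List String) : Decidable (Spec_travese_until_common orbit orbits common set_ out) := by unfold Spec_travese_until_common; infer_instance

-- ===== CLAIM (what is proved, stated in full; the proofs are below) =====
def Claim_equal_travese_until_common : Prop := ∀ (orbit : String) (orbits : List (String × String)) (common : List String) (set_ : Option (List String)), Dom_travese_until_common orbit orbits common set_ → Pre_travese_until_common orbit orbits common set_ → Spec_travese_until_common orbit orbits common set_ (travese_until_common orbit orbits common set_)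

-- ===== LEMMAS AND PROOFS =====
theorem travAux_succ (fuel : Nat) (orbit : String) (orbits : PySem.Dict String String) (common : List String) (set_ : PySem.Set String) :
    travAux (fuel + 1) orbit orbits common set_ =
      if common.contains orbit then set_
      else match orbits.get? orbit with
           | none => PySem.Set.add set_ orbit
           | some nxt => travAux fuel nxt orbits common (PySem.Set.add set_ orbit) := rfl

theorem travAux_of_contains (fuel : Nat) (orbit : String) (orbits : PySem.Dict String String) (common : List String) (set_ : PySem.Set String) (h : common.contains orbit = true) :
    travAux fuel orbit orbits common set_ = set_ := by
  have h' : orbit ∈ common := by simpa using h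
  cases fuel <;> simp [travAux, h']

theorem foldl_stepFold_none (orbits : PySem.Dict String String) (common : List String) (s : PySem.Set String) (l : List Int) :
    l.foldl (stepFold orbits common) (none, s) = (none, s) := by
  induction l with
  | nil => rfl
  | cons x xs ih => simpa [stepFold] using ih

-- The two traversals agree for EVERY fuel, node and set: the fold over any index list of
-- length n performs exactly the n test/add/lookup rounds A's recursion performs.
theorem foldl_stepFold_eq_travAux (orbits : PySem.Dict String String) (common : List String) (l : List Int) (orbit : String) (set_ : PySem.Set String) :
    (l.foldl (stepFold orbits common) (some orbit, set_)).2 = travAux l.length orbit orbits common set_ := by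
  induction l generalizing orbit set_ with
  | nil => rfl
  | cons x xs ih =>
    rw [List.foldl_cons, List.length_cons, travAux_succ]
    by_cases h : common.contains orbit
    · rw [if_pos h]
      simp only [stepFold, h, if_true]
      rw [ih, travAux_of_contains _ _ _ _ _ h]
    · rw [if_neg h]
      simp only [stepFold, h]
      cases hg : orbits.get? orbit with
      | none => simp [foldl_stepFold_none]
      | some nxt => simp [ih]

-- ===== VERDICT (by name: the statement is the Claim_ definition above) =====
theorem travese_until_common_spec : Claim_equal_travese_until_common := by
  intro orbit orbits common set_ _ _
  unfold Spec_travese_until_common travese_until_common travese_until_common_alt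
  rw [foldl_stepFold_eq_travAux, PySem.List.length_pyRange_one]
  norm_num
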